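-- pv_equiv track=rewrite | github.com/rolandzeiner/nextbike-austria | custom_components/nextbike_austria/config_flow.py | _match_stations
-- ===== SOURCE A (Python) =====
-- from typing import Any
--
-- def _match_stations(stations: list[dict[str, Any]], query: str) -> list[dict[str, Any]]:
--     """Return stations whose name contains ``query`` (case-insensitive).
--
--     Prefix matches rank above substring matches; within each group names
--     stay alphabetically sorted so the dropdown is stable across reloads.
--     """
--     q = query.lower().strip()
--     prefix: list[dict[str, Any]] = []
--     contains: list[dict[str, Any]] = []
--     for s in stations:
--         name = str(s.get("name") or "").lower()
--         if not name:
--             continue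
--         if name.startswith(q):
--             prefix.append(s)
--         elif q in name:
--             contains.append(s)
--     prefix.sort(key=lambda s: str(s.get("name") or ""))
--     contains.sort(key=lambda s: str(s.get("name") or ""))
--     return prefix + contains
-- ===== SOURCE B (Python) =====
-- from typing import Any
--
--
-- def _match_stations(stations: list[dict[str, Any]], query: str) -> list[dict[str, Any]]:
--     """Sort everything once by name up front, then two filter scans over the
--     ordered list: prefix matches first, then the remaining substring matches."""
--     q = query.lower().strip()
--
--     def low(s: dict[str, Any]) -> str:
--         return str(s.get("name") or "").lower()
--
--     ordered = sorted(stations, key=lambda s: str(s.get("name") or ""))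
--     return ([s for s in ordered if low(s) and low(s).startswith(q)]
--             + [s for s in ordered if low(s) and not low(s).startswith(q) and q in low(s)])
-- ===== Notes on version B (the rewrite author's own statement) =====
-- stated objective: alternative
-- what changed: Instead of partitioning matches into two buckets and sorting each bucket, B stably sorts the entire input once by name up front and then emits the result with two filter scans over that single ordered list (prefix matches, then remaining substring matches).
import Mathlib
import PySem

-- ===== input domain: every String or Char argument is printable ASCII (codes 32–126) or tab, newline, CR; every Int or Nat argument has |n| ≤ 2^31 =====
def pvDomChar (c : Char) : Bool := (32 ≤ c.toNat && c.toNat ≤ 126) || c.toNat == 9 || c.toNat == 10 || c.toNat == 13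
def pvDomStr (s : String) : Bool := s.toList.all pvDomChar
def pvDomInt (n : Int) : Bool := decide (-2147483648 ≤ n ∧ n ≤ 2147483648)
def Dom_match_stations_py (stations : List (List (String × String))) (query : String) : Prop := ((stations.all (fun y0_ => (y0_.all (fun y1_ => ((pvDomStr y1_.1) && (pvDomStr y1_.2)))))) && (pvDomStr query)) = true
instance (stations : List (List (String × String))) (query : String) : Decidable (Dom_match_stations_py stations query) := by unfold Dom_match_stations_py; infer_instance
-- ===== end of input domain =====

-- B sorts the whole input once by name up front and then emits the result with two filter scans over that ordered list, instead of A's partition-into-two-buckets with a separate sort of each; return value only, neither program mutates its input.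


-- ===== PORT A =====
-- str(s.get("name") or "") : the dict's values are strings, so a missing key and the value "" both give "" — exactly getD "".
def pvName (s : List (String × String)) : String := PySem.Dict.getD (PySem.Dict.mk s) "name" ""

def match_stations_py (stations : List (List (String × String))) (query : String) : List (List (String × String)) :=
  let q := PySem.Str.strip (PySem.Str.lower query)
  let pc := stations.foldl
    (fun (acc : List (List (String × String)) × List (List (String × String))) s =>
      let name := PySem.Str.lower (pvName s)
      if name = "" then acc
      else if PySem.Str.startswith name q then (acc.1 ++ [s], acc.2)
      else if PySem.Str.isIn q name then (acc.1, acc.2 ++ [s])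
      else acc) ([], [])
  PySem.List.sorted pc.1 (fun s => pvName s) ++ PySem.List.sorted pc.2 (fun s => pvName s)

-- ===== PORT B =====
-- the two comprehension conditions of Source B: "low(s) and low(s).startswith(q)" and
-- "low(s) and not low(s).startswith(q) and q in low(s)"
def pvP (q : String) (s : List (String × String)) : Bool :=
  !decide (PySem.Str.lower (pvName s) = "") && PySem.Str.startswith (PySem.Str.lower (pvName s)) q
def pvC (q : String) (s : List (String × String)) : Bool :=
  !decide (PySem.Str.lower (pvName s) = "")
    && !PySem.Str.startswith (PySem.Str.lower (pvName s)) q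
    && PySem.Str.isIn q (PySem.Str.lower (pvName s))

def match_stations_py_alt (stations : List (List (String × String))) (query : String) : List (List (String × String)) :=
  let q := PySem.Str.strip (PySem.Str.lower query)
  -- ordered = sorted(stations, key=name): one stable sort of the WHOLE input, done first
  let ordered := PySem.List.sorted stations (fun s => pvName s)
  -- then two filter scans over the ordered list
  ordered.filter (pvP q) ++ ordered.filter (pvC q)

-- ===== PRECONDITION & SPEC =====
def Spec_match_stations_py (stations : List (List (String × String))) (query : String) (out : List (List (String × String))) : Prop := out = match_stations_py_alt stations query
instance (stations : List (List (String × String))) (query : String) (out : List (List (String × String))) : Decidable (Spec_match_stations_py stations query out) := by unfold Spec_match_stations_py; infer_instance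

-- ===== CLAIM (what is proved, stated in full; the proofs are below) =====
def Claim_equal_match_stations_py : Prop := ∀ (stations : List (List (String × String))) (query : String), Dom_match_stations_py stations query → Spec_match_stations_py stations query (match_stations_py stations query)

-- ===== LEMMAS AND PROOFS =====

-- the two bucket predicates of A's loop, in the Chars normal form the bridge simp lemmas produce
def pvPreC (q : String) (s : List (String × String)) : Bool :=
  !decide (PySem.Str.lower (pvName s) = "")
    && PySem.Chars.startswith (PySem.Chars.lower (pvName s).toList) q.toList
def pvConC (q : String) (s : List (String × String)) : Bool :=
  !decide (PySem.Str.lower (pvName s) = "")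
    && !PySem.Chars.startswith (PySem.Chars.lower (pvName s).toList) q.toList
    && PySem.Chars.isIn q.toList (PySem.Chars.lower (pvName s).toList)

-- A's loop is the pair of filters appended to the accumulators
lemma pvLoopA (q : String) (xs : List (List (String × String)))
    (a b : List (List (String × String))) :
    xs.foldl
      (fun (acc : List (List (String × String)) × List (List (String × String))) s =>
        let name := PySem.Str.lower (pvName s)
        if name = "" then acc
        else if PySem.Str.startswith name q then (acc.1 ++ [s], acc.2)
        else if PySem.Str.isIn q name then (acc.1, acc.2 ++ [s])
        else acc) (a, b)
    = (a ++ xs.filter (pvPreC q), b ++ xs.filter (pvConC q)) := by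
  induction xs using List.reverseRecOn with
  | nil => simp
  | append_singleton t x ih =>
    rw [List.foldl_append, ih]
    simp only [List.foldl_cons, List.foldl_nil, List.filter_append, List.filter_cons,
      List.filter_nil, PySem.Str.startswith_eq, PySem.Str.isIn_eq, PySem.Str.toList_lower]
    by_cases h1 : PySem.Str.lower (pvName x) = ""
    · have hp : pvPreC q x = false := by simp [pvPreC, h1]
      have hc : pvConC q x = false := by simp [pvConC, h1]
      simp [h1, hp, hc]
    · by_cases h2 : PySem.Chars.startswith (PySem.Chars.lower (pvName x).toList) q.toList = true
      · have hp : pvPreC q x = true := by simp [pvPreC, h1, h2]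
        have hc : pvConC q x = false := by simp [pvConC, h2]
        simp [h1, h2, hp, hc, List.append_assoc]
      · by_cases h3 : PySem.Chars.isIn q.toList (PySem.Chars.lower (pvName x).toList) = true
        · have hp : pvPreC q x = false := by simp [pvPreC, h2]
          have hc : pvConC q x = true := by simp [pvConC, h1, h2, h3]
          simp [h1, h2, h3, hp, hc, List.append_assoc]
        · have hp : pvPreC q x = false := by simp [pvPreC, h2]
          have hc : pvConC q x = false := by simp [pvConC, h3]
          simp [h1, h2, h3, hp, hc]

-- B's comprehension conditions are exactly A's bucket predicates
lemma pvFilterP (q : String) (l : List (List (String × String))) :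
    l.filter (pvP q) = l.filter (pvPreC q) :=
  List.filter_congr (fun s _ => by
    simp [pvP, pvPreC, PySem.Str.startswith_eq, PySem.Str.toList_lower])
lemma pvFilterC (q : String) (l : List (List (String × String))) :
    l.filter (pvC q) = l.filter (pvConC q) :=
  List.filter_congr (fun s _ => by
    simp [pvC, pvConC, PySem.Str.startswith_eq, PySem.Str.isIn_eq, PySem.Str.toList_lower,
      Bool.and_assoc])

-- insertBy on a cons, definitionally
lemma pvInsertBy_cons {α : Type} (b : α → α → Bool) (x y : α) (t : List α) :
    PySem.List.insertBy b x (y :: t)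
      = if b x y then x :: y :: t else y :: PySem.List.insertBy b x t := rfl

-- if x goes before every kept element, insertBy puts it at the head
lemma pvInsertBy_cons_of_all {α : Type} (b : α → α → Bool) (x : α) (l : List α)
    (h : ∀ y ∈ l, b x y = true) :
    PySem.List.insertBy b x l = x :: l := by
  cases l with
  | nil => rfl
  | cons y t => rw [pvInsertBy_cons, if_pos (by exact_mod_cast h y (by simp))]

-- filtering commutes with inserting into a key-sorted list
lemma pvFilter_insertBy {α : Type} (key : α → String) (p : α → Bool) (x : α) (L : List α)
    (hs : L.Pairwise (fun a c => key a ≤ key c)) :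
    (PySem.List.insertBy (fun a c => decide (key a < key c)) x L).filter p
      = if p x then PySem.List.insertBy (fun a c => decide (key a < key c)) x (L.filter p)
        else L.filter p := by
  induction L with
  | nil =>
    by_cases hx : p x = true <;> simp [PySem.List.insertBy, hx]
  | cons y t ih =>
    rcases List.pairwise_cons.1 hs with ⟨hy, ht⟩
    by_cases h2 : (decide (key x < key y) : Bool) = true
    · -- x is inserted at the head of y :: t
      have hall : ∀ z ∈ (y :: t).filter p, (decide (key x < key z) : Bool) = true := by
        intro z hz
        have hz' := List.mem_filter.1 hz
        rcases List.mem_cons.1 hz'.1 with rfl | hzt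
        · exact h2
        · have := hy z hzt
          simp only [decide_eq_true_eq] at h2 ⊢
          exact lt_of_lt_of_le h2 this
      rw [pvInsertBy_cons, if_pos (by exact_mod_cast h2)]
      by_cases hx : p x = true
      · rw [pvInsertBy_cons_of_all _ _ _ hall]
        simp [List.filter_cons, hx]
      · simp [List.filter_cons, hx]
    · rw [pvInsertBy_cons, if_neg (by simpa using h2)]
      by_cases hyp : p y = true
      · simp only [List.filter_cons, hyp, if_pos, ih ht]
        by_cases hx : p x = true
        · simp only [hx, if_pos]
          rw [pvInsertBy_cons, if_neg (by simpa using h2)]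
        · simp [hx]
      · rw [List.filter_cons, if_neg hyp, List.filter_cons, if_neg hyp, ih ht]

-- filtering a stably key-sorted list = stably key-sorting the filtered list
lemma pvFilter_sorted {α : Type} (key : α → String) (p : α → Bool) (l : List α) :
    (PySem.List.sorted l key).filter p = PySem.List.sorted (l.filter p) key := by
  induction l using List.reverseRecOn with
  | nil => rfl
  | append_singleton t x ih =>
    have hS : ∀ (m : List α),
        PySem.List.sorted (m ++ [x]) key
          = PySem.List.insertBy (fun a c => decide (key a < key c)) x (PySem.List.sorted m key) := by
      intro m; simp [PySem.List.sorted, List.foldl_append]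
    rw [hS, pvFilter_insertBy key p x _ (PySem.List.sorted_pairwise t key), ih,
      List.filter_append, List.filter_cons, List.filter_nil]
    by_cases hx : p x = true
    · simp [hx, hS]
    · simp [hx]

-- ===== VERDICT (by name: the statement is the Claim_ definition above) =====
theorem match_stations_py_spec : Claim_equal_match_stations_py := by
  intro stations query _
  unfold Spec_match_stations_py match_stations_py match_stations_py_alt
  simp only [pvLoopA, List.nil_append, pvFilter_sorted, pvFilterP, pvFilterC]
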